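-- pv_equiv track=rewrite | github.com/ryoryoe/D-child | mymodule.py | sort_and_combine_strings
-- ===== SOURCE A (Python) =====
-- def sort_and_combine_strings(input_array):
--     a = []
--     b = []
--     for string in input_array:
--         if not '-' in string:
--             a.append(string)
--         if '-' in string:
--             b.append(string)
--     file_names = a + b
--     return file_names
-- ===== SOURCE B (Python) =====
-- def sort_and_combine_strings(input_array):
--     return sorted(input_array, key=lambda string: '-' in string)
-- ===== Notes on version B (the rewrite author's own statement) =====
-- stated objective: idiomatic
-- what changed: Replaces the explicit two-list partition-and-concatenate with a single stable sort on the boolean key '-' in s, whose stability reproduces A's order exactly.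
import Mathlib
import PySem

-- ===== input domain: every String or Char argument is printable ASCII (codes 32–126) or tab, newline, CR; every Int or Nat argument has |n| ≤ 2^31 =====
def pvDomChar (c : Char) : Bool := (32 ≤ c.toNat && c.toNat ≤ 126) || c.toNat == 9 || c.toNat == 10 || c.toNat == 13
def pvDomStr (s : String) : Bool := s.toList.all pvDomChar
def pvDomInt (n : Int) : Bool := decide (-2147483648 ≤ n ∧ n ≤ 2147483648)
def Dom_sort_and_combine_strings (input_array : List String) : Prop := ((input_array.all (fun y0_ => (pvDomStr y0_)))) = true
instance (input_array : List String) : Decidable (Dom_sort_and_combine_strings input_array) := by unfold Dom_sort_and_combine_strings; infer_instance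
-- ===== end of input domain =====

-- B replaces A's two-list partition-and-concatenate by one stable sort on the boolean key '-' in s (idiomatic; same result by stability).

-- ===== PORT A =====
-- A: two accumulators a, b; two independent ifs per element; return a + b.
def pvStepA (ab : List String × List String) (string : String) : List String × List String :=
  let ab := if ¬ (PySem.Str.isIn "-" string = true) then (ab.1 ++ [string], ab.2) else ab
  if PySem.Str.isIn "-" string = true then (ab.1, ab.2 ++ [string]) else ab

def sort_and_combine_strings (input_array : List String) : List String :=
  let ab := input_array.foldl pvStepA ([], [])
  ab.1 ++ ab.2

-- ===== PORT B =====
-- B: sorted(input_array, key=lambda string: '-' in string)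
def sort_and_combine_strings_alt (input_array : List String) : List String :=
  PySem.List.sorted input_array (fun string => PySem.Str.isIn "-" string) false

-- ===== PRECONDITION & SPEC =====
def Spec_sort_and_combine_strings (input_array : List String) (out : List String) : Prop := out = sort_and_combine_strings_alt input_array
instance (input_array : List String) (out : List String) : Decidable (Spec_sort_and_combine_strings input_array out) := by unfold Spec_sort_and_combine_strings; infer_instance

-- ===== CLAIM (what is proved, stated in full; the proofs are below) =====
def Claim_equal_sort_and_combine_strings : Prop := ∀ (input_array : List String), Dom_sort_and_combine_strings input_array → Spec_sort_and_combine_strings input_array (sort_and_combine_strings input_array)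

-- ===== LEMMAS AND PROOFS =====

-- insertBy cons equation
theorem insertBy_cons {α : Type} (before : α → α → Bool) (x y : α) (ys : List α) :
    PySem.List.insertBy before x (y :: ys) =
      if before x y then x :: y :: ys else y :: PySem.List.insertBy before x ys := rfl

-- inserting a false-key element lands right after the false-key block
theorem insertBy_false (key : α → Bool) (x : α) (hx : key x = false) :
    ∀ (f t : List α), (∀ y ∈ f, key y = false) → (∀ y ∈ t, key y = true) →
      PySem.List.insertBy (fun a b => decide (key a < key b)) x (f ++ t) = f ++ x :: t := by
  intro f
  induction f with
  | nil =>
    intro t _ ht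
    cases t with
    | nil => rfl
    | cons y ys =>
      have hy : key y = true := ht y (by simp)
      simp [insertBy_cons, hx, hy]
  | cons z f ih =>
    intro t hf ht
    have hz : key z = false := hf z (by simp)
    simp only [List.cons_append, insertBy_cons, hx, hz]
    simp [ih t (fun y hy => hf y (by simp [hy])) ht]

-- inserting a true-key element goes to the very end
theorem insertBy_true (key : α → Bool) (x : α) (hx : key x = true) (ys : List α) :
    PySem.List.insertBy (fun a b => decide (key a < key b)) x ys = ys ++ [x] := by
  apply PySem.List.insertBy_of_forall_not_before
  intro y _
  cases hky : key y <;> simp [hx, hky]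

-- the stable-insertion fold keeps a "false keys, then true keys" invariant
theorem sorted_fold_partition (key : α → Bool) :
    ∀ (xs f t : List α), (∀ y ∈ f, key y = false) → (∀ y ∈ t, key y = true) →
      xs.foldl (fun acc x => PySem.List.insertBy (fun a b => decide (key a < key b)) x acc) (f ++ t)
        = (f ++ xs.filter (fun s => !key s)) ++ (t ++ xs.filter key) := by
  intro xs
  induction xs with
  | nil => intro f t _ _; simp
  | cons x xs ih =>
    intro f t hf ht
    cases hx : key x with
    | false =>
      have h1 := insertBy_false key x hx f t hf ht
      have h2 := ih (f ++ [x]) t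
        (fun y hy => by rcases (List.mem_append.mp hy) with h | h
                        · exact hf y h
                        · simp at h; simpa [h] using hx) ht
      simp only [List.foldl_cons, h1]
      have : f ++ x :: t = (f ++ [x]) ++ t := by simp
      rw [this, h2]
      simp [hx]
    | true =>
      have h1 := insertBy_true key x hx (f ++ t)
      have h2 := ih f (t ++ [x]) hf
        (fun y hy => by rcases (List.mem_append.mp hy) with h | h
                        · exact ht y h
                        · simp at h; simpa [h] using hx)
      simp only [List.foldl_cons, h1]
      have : (f ++ t) ++ [x] = f ++ (t ++ [x]) := by simp
      rw [this, h2]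
      simp [hx]

theorem alt_eq_filters (xs : List String) :
    sort_and_combine_strings_alt xs
      = xs.filter (fun s => !PySem.Str.isIn "-" s) ++ xs.filter (fun s => PySem.Str.isIn "-" s) := by
  unfold sort_and_combine_strings_alt
  rw [PySem.List.sorted_eq_foldl_insertBy]
  simpa using sorted_fold_partition (fun s => PySem.Str.isIn "-" s) xs [] []
    (by simp) (by simp)

-- A's fold builds exactly the two filters
theorem a_fold_filters (xs : List String) :
    ∀ (a b : List String),
      xs.foldl pvStepA (a, b)
      = (a ++ xs.filter (fun s => !PySem.Str.isIn "-" s), b ++ xs.filter (fun s => PySem.Str.isIn "-" s)) := by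
  induction xs with
  | nil => intro a b; simp
  | cons x xs ih =>
    intro a b
    cases hx : PySem.Chars.isIn ['-'] x.toList <;> simp [pvStepA, PySem.Str.isIn, hx, ih]

-- ===== VERDICT (by name: the statement is the Claim_ definition above) =====
theorem sort_and_combine_strings_spec : Claim_equal_sort_and_combine_strings := by
  intro xs _
  unfold Spec_sort_and_combine_strings
  rw [alt_eq_filters]
  unfold sort_and_combine_strings
  rw [a_fold_filters xs [] []]
  simp
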